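-- pv_equiv track=rewrite | github.com/omarshobaki-png/Sudoku-Solver-with-AI-Technologies | csp.py | hasEmptyDomain
-- ===== SOURCE A (Python) =====
-- import math
--
-- def isValid(grid, row, col, value):
--     size = len(grid)
--
--     # row check
--     if value in grid[row]:
--         return False
--
--     # column check
--     for r in range(size):
--         if grid[r][col] == value:
--             return False
--
--     # box check (works for 9x9 and 16x16)
--     box_size = int(math.sqrt(size))
--     #box rows and columns are 0,3,6 for 9x9 and 0,4,8,12 for 16x16
--     box_row = int(math.floor(row / box_size) * box_size)
--     box_column = int(math.floor(col / box_size) * box_size)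
--
--     for r in range(box_row, box_row + box_size):
--         for c in range(box_column, box_column + box_size):
--             if grid[r][c] == value:
--                 return False
--
--     return True
--
-- def getDomain(grid, row, col):
--     domain = []
--     size = len(grid)
--
--     for v in range(1, size + 1):
--         if isValid(grid, row, col, v):
--             domain.append(v)
--
--     return domain
--
-- def hasEmptyDomain(grid):
--     size = len(grid)
--     for r in range(size):
--         for c in range(size):
--             if grid[r][c] == 0:
--                 if len(getDomain(grid, r, c)) == 0:
--                     return True
--     return False
-- ===== SOURCE B (Python) =====
-- import math
--
-- def hasEmptyDomain(grid):
--     size = len(grid)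
--     if size == 0:
--         return False
--     b = int(math.sqrt(size))
--     nb = size // b
--     rows = [set(row) for row in grid]
--     cols = [{grid[r][c] for r in range(size)} for c in range(size)]
--     boxes = [{grid[(k // nb) * b + i][(k % nb) * b + j] for i in range(b) for j in range(b)}
--              for k in range(nb * nb)]
--     full = set(range(1, size + 1))
--     return any(full <= rows[r] | cols[c] | boxes[(r // b) * nb + c // b]
--                for r in range(size) for c in range(size) if grid[r][c] == 0)
-- ===== Notes on version B (the rewrite author's own statement) =====
-- stated objective: simpler
-- what changed: B precomputes the used-value sets of every row, column and box tile once and decides each empty cell by a single subset test (full value set contained in the union of its three sets), removing A's per-value isValid trial loop with its repeated row/column/box scans.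
import Mathlib
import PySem

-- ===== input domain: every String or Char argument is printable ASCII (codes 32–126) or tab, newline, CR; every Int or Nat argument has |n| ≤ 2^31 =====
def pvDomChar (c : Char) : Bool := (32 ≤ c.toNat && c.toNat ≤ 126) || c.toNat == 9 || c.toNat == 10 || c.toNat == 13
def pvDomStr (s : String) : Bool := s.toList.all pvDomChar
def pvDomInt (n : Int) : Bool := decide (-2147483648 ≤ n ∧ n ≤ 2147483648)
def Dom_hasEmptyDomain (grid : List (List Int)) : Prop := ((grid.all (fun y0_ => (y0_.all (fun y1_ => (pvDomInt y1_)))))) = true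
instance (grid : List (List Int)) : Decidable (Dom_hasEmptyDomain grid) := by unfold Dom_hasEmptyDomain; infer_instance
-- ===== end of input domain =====

-- B precomputes per-row/column/box used-value sets once and replaces A's per-value
-- isValid trial loop by one subset (set-cover) test per empty cell; objective: simpler.

-- ===== PORT A =====
def pvCell (grid : List (List Int)) (r c : Nat) : Int := (grid.getD r []).getD c 0

def pvIsValid (grid : List (List Int)) (row col : Nat) (value : Int) : Bool :=
  let size := grid.length
  if value ∈ grid.getD row [] then false
  else if (List.range size).any (fun r => pvCell grid r col == value) then false
  else
    let bs := Nat.sqrt size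
    let boxRow := row / bs * bs
    let boxCol := col / bs * bs
    if (List.range bs).any (fun i => (List.range bs).any (fun j =>
          pvCell grid (boxRow + i) (boxCol + j) == value)) then false
    else true

def pvGetDomain (grid : List (List Int)) (row col : Nat) : List Int :=
  (List.range grid.length).foldl
    (fun domain i => if pvIsValid grid row col ((i : Int) + 1) then domain ++ [(i : Int) + 1] else domain) []

def hasEmptyDomain (grid : List (List Int)) : Bool :=
  let size := grid.length
  (List.range size).any (fun r => (List.range size).any (fun c =>
    pvCell grid r c == 0 && (pvGetDomain grid r c).length == 0))

-- ===== PORT B =====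
def altCell (grid : List (List Int)) (r c : Nat) : Int := (grid.getD r []).getD c 0

def hasEmptyDomain_alt (grid : List (List Int)) : Bool :=
  let size := grid.length
  if size = 0 then false
  else
    let b := Nat.sqrt size
    let nb := size / b
    let rows : List (PySem.Set Int) := grid.map (fun row => PySem.Set.ofList row)
    let cols : List (PySem.Set Int) :=
      (List.range size).map (fun c => PySem.Set.ofList ((List.range size).map (fun r => altCell grid r c)))
    let boxes : List (PySem.Set Int) :=
      (List.range (nb * nb)).map (fun k => PySem.Set.ofList
        ((List.range b).flatMap (fun i => (List.range b).map (fun j =>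
          altCell grid (k / nb * b + i) (k % nb * b + j)))))
    let full : PySem.Set Int := PySem.Set.ofList ((List.range size).map (fun i => (i : Int) + 1))
    (List.range size).any (fun r => (List.range size).any (fun c =>
      altCell grid r c == 0 &&
        PySem.Set.issubset full
          (PySem.Set.union (PySem.Set.union (rows.getD r []) (cols.getD c []))
            (boxes.getD (r / b * nb + c / b) []))))

-- ===== PRECONDITION & SPEC =====
-- Pre_ excludes grids whose side is not divided by the integer square root of the side
-- (outside Sudoku's natural domain: there A's box scan walks off the grid and raises
-- IndexError on most inputs, and B's box-table indexing raises likewise) and grids with a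
-- row shorter than the side, on which A raises IndexError at the first cell read.
def Pre_hasEmptyDomain (grid : List (List Int)) : Prop :=
  (∀ row ∈ grid, grid.length ≤ row.length) ∧
  ∃ b ≤ grid.length, b * b ≤ grid.length ∧ grid.length < (b + 1) * (b + 1) ∧
    grid.length % b = 0
instance (grid : List (List Int)) : Decidable (Pre_hasEmptyDomain grid) := by
  unfold Pre_hasEmptyDomain; infer_instance

def pvWitness_hasEmptyDomain : List (List Int) := [[0, 2, 3, 4], [3, 4, 1, 2], [2, 1, 4, 3], [4, 3, 2, 1]]

def Spec_hasEmptyDomain (grid : List (List Int)) (out : Bool) : Prop := out = hasEmptyDomain_alt grid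
instance (grid : List (List Int)) (out : Bool) : Decidable (Spec_hasEmptyDomain grid out) := by unfold Spec_hasEmptyDomain; infer_instance

-- ===== CLAIM (what is proved, stated in full; the proofs are below) =====
def Claim_equal_hasEmptyDomain : Prop := ∀ (grid : List (List Int)), Dom_hasEmptyDomain grid → Pre_hasEmptyDomain grid → Spec_hasEmptyDomain grid (hasEmptyDomain grid)

-- ===== LEMMAS AND PROOFS =====

lemma getD_map_of_lt {α β : Type} (f : α → β) (l : List α) {k : Nat} (h : k < l.length) (d : β) :
    (l.map f).getD k d = f (l[k]) := by
  rw [List.getD_eq_getElem?_getD, List.getElem?_map, List.getElem?_eq_getElem h]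
  rfl

lemma getD_map_range {β : Type} (f : Nat → β) {n k : Nat} (h : k < n) (d : β) :
    ((List.range n).map f).getD k d = f k := by
  rw [getD_map_of_lt f _ (by simpa using h) d]
  simp

-- A's isValid returns False exactly when the value occurs in the row, the column or the box.
lemma valid_false_iff (grid : List (List Int)) (row col : Nat) (v : Int) :
    pvIsValid grid row col v = false ↔
      v ∈ grid.getD row [] ∨
      (∃ r < grid.length, pvCell grid r col = v) ∨
      (∃ i < Nat.sqrt grid.length, ∃ j < Nat.sqrt grid.length,
        pvCell grid (row / Nat.sqrt grid.length * Nat.sqrt grid.length + i)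
                    (col / Nat.sqrt grid.length * Nat.sqrt grid.length + j) = v) := by
  simp only [pvIsValid]
  split_ifs with h1 h2 h3
  · simpa using Or.inl h1
  · simp only [List.any_eq_true, List.mem_range, beq_iff_eq] at h2
    simpa using Or.inr (Or.inl h2)
  · simp only [List.any_eq_true, List.mem_range, beq_iff_eq] at h3
    simpa using Or.inr (Or.inr h3)
  · simp only [List.any_eq_true, List.mem_range, beq_iff_eq, not_exists, not_and] at h2 h3
    constructor
    · intro h; simp at h
    · rintro (h | ⟨r', hr', he⟩ | ⟨i', hi', j', hj', he⟩)
      · exact absurd h h1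
      · exact absurd he (h2 r' hr')
      · exact absurd he (h3 i' hi' j' hj')

-- A's domain of a cell is empty exactly when every value 1..size is invalid there.
lemma domain_empty_iff (grid : List (List Int)) (row col : Nat) :
    pvGetDomain grid row col = [] ↔
      ∀ i < grid.length, pvIsValid grid row col ((i : Int) + 1) = false := by
  unfold pvGetDomain
  rw [PySem.List.foldl_append_if (fun i => pvIsValid grid row col ((i : Int) + 1))
      (fun i => ((i : Int) + 1))]
  simp only [List.nil_append, List.map_eq_nil_iff, List.filter_eq_nil_iff,
    Bool.not_eq_true]
  constructor
  · intro h i hi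
    apply h
    simp only [List.mem_flatMap, List.mem_range, List.mem_pure, List.bind_eq_flatMap]
    exact ⟨i, hi, rfl⟩
  · intro h a ha
    simp only [List.mem_flatMap, List.mem_range, List.mem_pure, List.bind_eq_flatMap] at ha
    obtain ⟨i, hi, rfl⟩ := ha
    exact h i hi

-- Per empty cell, A's "domain is empty" test agrees with B's subset test
-- (b is A's box side = sqrt(size), nb the number of box tiles per side).
lemma cell_iff (grid : List (List Int)) (b nb : Nat)
    (hb : b = Nat.sqrt grid.length) (hbpos : 0 < b) (hnb : nb * b = grid.length)
    {r c : Nat} (hr : r < grid.length) (hc : c < grid.length) :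
    ((pvGetDomain grid r c).length == 0) = true ↔
      PySem.Set.issubset
        (PySem.Set.ofList ((List.range grid.length).map (fun i => (i : Int) + 1)))
        (PySem.Set.union
          (PySem.Set.union
            ((grid.map (fun row => PySem.Set.ofList row)).getD r [])
            (((List.range grid.length).map (fun c => PySem.Set.ofList
                ((List.range grid.length).map (fun r => altCell grid r c)))).getD c []))
          (((List.range (nb * nb)).map (fun k => PySem.Set.ofList
              ((List.range b).flatMap (fun i => (List.range b).map (fun j =>
                altCell grid (k / nb * b + i) (k % nb * b + j)))))).getD
            (r / b * nb + c / b) []))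
        = true := by
  have hnbpos : 0 < nb := by
    rcases Nat.eq_zero_or_pos nb with h | h
    · subst h; simp at hnb; omega
    · exact h
  have hrb : r / b < nb := (Nat.div_lt_iff_lt_mul hbpos).mpr (by rw [hnb]; exact hr)
  have hcb : c / b < nb := (Nat.div_lt_iff_lt_mul hbpos).mpr (by rw [hnb]; exact hc)
  have hk : r / b * nb + c / b < nb * nb := by
    have h1 : r / b * nb ≤ (nb - 1) * nb := Nat.mul_le_mul_right _ (by omega)
    calc r / b * nb + c / b ≤ (nb - 1) * nb + c / b := Nat.add_le_add_right h1 _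
      _ < (nb - 1) * nb + nb := Nat.add_lt_add_left hcb _
      _ = nb * nb := by
          rw [Nat.sub_one_mul, Nat.sub_add_cancel (Nat.le_mul_of_pos_left _ hnbpos)]
  -- reduce the getD-indexed tables
  rw [getD_map_of_lt _ _ hr, getD_map_range _ hc, getD_map_range _ hk]
  -- the flat box index decodes back to A's box coordinates
  have hkdiv : (r / b * nb + c / b) / nb = r / b := by
    rw [Nat.mul_comm (r / b) nb, Nat.mul_add_div hnbpos, Nat.div_eq_of_lt hcb, Nat.add_zero]
  have hkmod : (r / b * nb + c / b) % nb = c / b := by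
    rw [Nat.mul_comm (r / b) nb, Nat.mul_add_mod, Nat.mod_eq_of_lt hcb]
  rw [hkdiv, hkmod]
  have hgr : grid.getD r [] = grid[r] := by
    rw [List.getD_eq_getElem?_getD, List.getElem?_eq_getElem hr]; rfl
  simp only [beq_iff_eq, List.length_eq_zero_iff, domain_empty_iff, valid_false_iff, ← hb, hgr,
    PySem.Set.issubset_iff, PySem.Set.mem_union, PySem.Set.mem_ofList, List.mem_map,
    List.mem_flatMap, List.mem_range, altCell, pvCell]
  constructor
  · rintro h x ⟨a, ha, rfl⟩
    simp only [List.bind_eq_flatMap, List.mem_flatMap, List.mem_range, List.mem_pure] at ha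
    obtain ⟨i, hi, rfl⟩ := ha
    rcases h i hi with h1 | h2 | h3
    · exact Or.inl (Or.inl h1)
    · exact Or.inl (Or.inr h2)
    · exact Or.inr h3
  · intro h i hi
    rcases h ((i : Int) + 1)
        ⟨(i : Int), by
          simp only [List.bind_eq_flatMap, List.mem_flatMap, List.mem_range, List.mem_pure]
          exact ⟨i, hi, rfl⟩, rfl⟩ with (h1 | h2) | h3
    · exact Or.inl h1
    · exact Or.inr (Or.inl h2)
    · exact Or.inr (Or.inr h3)

-- ===== VERDICT (by name: the statement is the Claim_ definition above) =====
theorem hasEmptyDomain_spec : Claim_equal_hasEmptyDomain := by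
  intro grid _ hpre
  obtain ⟨-, b, hble, hbsq, hbsq', hmod⟩ := hpre
  unfold Spec_hasEmptyDomain
  rcases Nat.eq_zero_or_pos grid.length with hz | hpos
  · have : grid = [] := List.length_eq_zero_iff.mp hz
    subst this; rfl
  · have hbpos : 0 < b := by
      rcases Nat.eq_zero_or_pos b with h | h
      · subst h; simp at hbsq'; omega
      · exact h
    have hb : b = Nat.sqrt grid.length := by
      refine le_antisymm (Nat.le_sqrt.mpr ?_) (Nat.le_of_lt_succ (Nat.sqrt_lt.mpr ?_))
      · simpa [Nat.pow_two] using hbsq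
      · simpa [Nat.pow_two] using hbsq'
    have hnb : grid.length / b * b = grid.length :=
      Nat.div_mul_cancel (Nat.dvd_of_mod_eq_zero hmod)
    apply Bool.eq_iff_iff.mpr
    simp only [hasEmptyDomain, hasEmptyDomain_alt, if_neg (by omega : ¬ grid.length = 0),
      List.any_eq_true, List.mem_range]
    constructor
    · rintro ⟨r, hr, c, hc, h⟩
      refine ⟨r, hr, c, hc, ?_⟩
      rw [Bool.and_eq_true] at h ⊢
      exact ⟨h.1, (cell_iff grid (Nat.sqrt grid.length)
        (grid.length / Nat.sqrt grid.length) rfl (hb ▸ hbpos) (hb ▸ hnb) hr hc).mp h.2⟩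
    · rintro ⟨r, hr, c, hc, h⟩
      refine ⟨r, hr, c, hc, ?_⟩
      rw [Bool.and_eq_true] at h ⊢
      exact ⟨h.1, (cell_iff grid (Nat.sqrt grid.length)
        (grid.length / Nat.sqrt grid.length) rfl (hb ▸ hbpos) (hb ▸ hnb) hr hc).mpr h.2⟩
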